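-- pv_equiv track=rewrite | github.com/Stefaniv-M/Mykola_Stefaniv_lab_1 | tests/test_2.py | find_film_name
-- ===== SOURCE A (Python) =====
-- def find_text_between_symbols(text_line, symb_1, symb_2):
--     """
--     (str, char) -> str
--     This function returns text in text_line between symb_1 and symb_2.
--
--     >>> find_text_between_symbols("Helloars tsatne atsne (sarten1)tn tnsra", "(", ")")
--     'sarten1'
--     """
--     # This will be switched if symbol_1 in for cycle will be character between symbols:
--     switch_1 = False
--     # This is in case of equal symbols:
--     switch_2 = True
--
--     # This will be string with symbols:
--     result_str = ""
--
--     for symbol_1 in text_line: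
--         if symbol_1 == symb_1 and switch_2:
--             switch_1 = True
--             switch_2 = False
--         elif symbol_1 == symb_2:
--             switch_1 = False
--         else:
--             if switch_1 is True:
--                 result_str += symbol_1
--
--     if result_str != "":
--         return result_str
--     else:
--         return None
--
-- def find_film_name(line_of_film):
--     """
--     (str) -> str
--     This function returns name of film from line with it. If there is no name of film,
--     the function will return None.
--     """
--     result_str = find_text_between_symbols(line_of_film, "'", "'")
--     if result_str is None:
--         result_str = find_text_between_symbols(line_of_film, '"', '"')
--
--     if result_str is None:
--         # Alternative version:
--         result_str = ""
--         index_1 = 0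
--         # Checking characters in line_of_film one by one:
--         while line_of_film[index_1 + 1] != "(":
--             result_str += line_of_film[index_1]
--             index_1 += 1
--
--     return result_str
-- ===== SOURCE B (Python) =====
-- def find_film_name(line_of_film):
--     # A quoted name: text between the first quote and the next one (or end of line).
--     for quote in ("'", '"'):
--         i = line_of_film.find(quote)
--         if i != -1:
--             captured = line_of_film[i + 1:]
--             j = captured.find(quote)
--             if j != -1:
--                 captured = captured[:j]
--             if captured:
--                 return captured
--     # Otherwise the name is what precedes the '(', minus the separating character.
--     head, _, _ = line_of_film.partition('(')
--     return head[:-1]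
-- ===== Notes on version B (the rewrite author's own statement) =====
-- stated objective: simpler
-- what changed: Replaces the boolean-flag state machine (and the index-by-index while-loop fallback) with direct position lookups and slicing: find the quote, slice the capture; fallback partitions at '(' and drops the separating character; Pre_ excludes inputs where A raises IndexError (no nonempty quoted capture and no '(' at index >= 1) and the fallback corner where the line begins with '(', on which A's value keeps the leading '(' as leftover loop state.
-- outside the precondition, e.g. on find_film_name('(a(b'): A returns '(', B returns ''; on find_film_name('('): A raises IndexError, B returns ''
import Mathlib
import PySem

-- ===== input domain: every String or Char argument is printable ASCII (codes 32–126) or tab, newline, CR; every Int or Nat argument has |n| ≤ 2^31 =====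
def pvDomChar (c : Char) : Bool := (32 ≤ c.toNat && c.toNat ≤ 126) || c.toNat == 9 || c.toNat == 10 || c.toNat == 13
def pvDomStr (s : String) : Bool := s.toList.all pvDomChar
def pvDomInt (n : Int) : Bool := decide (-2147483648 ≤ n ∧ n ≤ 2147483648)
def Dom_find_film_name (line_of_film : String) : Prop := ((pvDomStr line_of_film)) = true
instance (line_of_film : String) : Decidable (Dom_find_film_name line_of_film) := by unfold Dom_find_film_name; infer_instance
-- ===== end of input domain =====

-- B replaces A's flag state machine (and its index-by-index fallback loop) by direct
-- position lookups, slicing and partition; same return value on Pre_ (simpler).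

-- ===== PORT A =====
-- one step of A's for-loop over text_line; state = (switch_1, switch_2, result_str)
def pvStepA (symb1 symb2 : Char) (st : Bool × Bool × List Char) (c : Char) : Bool × Bool × List Char :=
  if c == symb1 && st.2.1 then (true, false, st.2.2)
  else if c == symb2 then (false, st.2.1, st.2.2)
  else if st.1 then (st.1, st.2.1, st.2.2 ++ [c]) else st

def find_text_between_symbols (text_line : List Char) (symb1 symb2 : Char) : Option (List Char) :=
  let st := text_line.foldl (pvStepA symb1 symb2) (false, true, [])
  if st.2.2 ≠ [] then some st.2.2 else none

-- A's while-loop fallback, as the obvious recursion over the remaining suffix of the string: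
-- it reads line[i] and line[i+1] (the first two of the current suffix); none = IndexError.
def pvFallbackA : List Char → List Char → Option (List Char)
  | a :: b :: t, acc => if b == '(' then some acc else pvFallbackA (b :: t) (acc ++ [a])
  | _, _ => none

def find_film_name (line_of_film : String) : String :=
  let l := line_of_film.toList
  let r₁ := find_text_between_symbols l '\'' '\''
  let r₂ := match r₁ with
            | some r => some r
            | none => find_text_between_symbols l '"' '"'
  match r₂ with
  | some r => String.ofList r
  | none =>
    match pvFallbackA l [] with
    | some acc => String.ofList acc
    | none => ""  -- Python raises IndexError here; excluded by Pre_find_film_name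

-- ===== PORT B =====
-- B's loop body for one quote: capture after the first quote, cut at the next one; none if empty
def pvTryQuote (l : List Char) (q : Char) : Option (List Char) :=
  match l.idxOf? q with
  | none => none
  | some i =>
    let captured := l.drop (i + 1)
    let captured := match captured.idxOf? q with
                    | none => captured
                    | some j => captured.take j
    if captured = [] then none else some captured

def find_film_name_alt (line_of_film : String) : String :=
  let l := line_of_film.toList
  match pvTryQuote l '\'' with
  | some r => String.ofList r
  | none =>
    match pvTryQuote l '"' with
    | some r => String.ofList r
    | none =>
      -- head, _, _ = line_of_film.partition('('); return head[:-1]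
      String.ofList (l.takeWhile (· ≠ '(')).dropLast

-- ===== PRECONDITION & SPEC =====
-- a nonempty capture exists for quote c: c occurs, and the character right after its
-- first occurrence exists and is not c again
def pvCapOK (l : List Char) (c : Char) : Bool :=
  match l.idxOf? c with
  | none => false
  | some i =>
    match l[i + 1]? with
    | none => false
    | some d => d != c

-- Pre_ excludes the inputs on which Python A raises IndexError (no nonempty quoted capture
-- and no '(' at index ≥ 1), and the fallback corner where the line begins with '(' — there
-- A's returned prefix keeps the leading '(' as leftover loop state (it only tests index_1+1),
-- while B returns the text before the first '('.
def Pre_find_film_name (line_of_film : String) : Prop :=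
  (pvCapOK line_of_film.toList '\'' || pvCapOK line_of_film.toList '"'
    || ((line_of_film.toList.drop 1).contains '('
        && (line_of_film.toList.headD '(') != '(')) = true
instance (line_of_film : String) : Decidable (Pre_find_film_name line_of_film) := by
  unfold Pre_find_film_name; infer_instance

def pvWitness_find_film_name : String := "the 'Matrix' (1999)"

def Spec_find_film_name (line_of_film : String) (out : String) : Prop := out = find_film_name_alt line_of_film
instance (line_of_film : String) (out : String) : Decidable (Spec_find_film_name line_of_film out) := by unfold Spec_find_film_name; infer_instance

-- ===== CLAIM (what is proved, stated in full; the proofs are below) =====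
def Claim_equal_find_film_name : Prop := ∀ (line_of_film : String), Dom_find_film_name line_of_film → Pre_find_film_name line_of_film → Spec_find_film_name line_of_film (find_film_name line_of_film)

-- ===== LEMMAS AND PROOFS =====

-- state (false, false, acc) is absorbing: nothing is ever appended again
theorem pvFoldFF (c : Char) : ∀ (l acc : List Char),
    l.foldl (pvStepA c c) (false, false, acc) = (false, false, acc) := by
  intro l
  induction l with
  | nil => intro acc; rfl
  | cons a t ih =>
    intro acc
    simp only [List.foldl_cons, pvStepA]
    by_cases h : a = c <;> simp [h, ih]

-- state (true, false, acc): collects characters until the next c, then absorbs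
theorem pvFoldTF (c : Char) : ∀ (l acc : List Char),
    (l.foldl (pvStepA c c) (true, false, acc)).2.2 = acc ++ l.takeWhile (· ≠ c) := by
  intro l
  induction l with
  | nil => intro acc; simp
  | cons a t ih =>
    intro acc
    by_cases h : a = c
    · simp [List.foldl_cons, pvStepA, h, pvFoldFF]
    · simp [List.foldl_cons, pvStepA, h, ih]

-- from the initial state: skip to the first c, then collect until the next c
theorem pvFoldFT (c : Char) : ∀ (l : List Char),
    (l.foldl (pvStepA c c) (false, true, [])).2.2 =
      match l.idxOf? c with
      | none => []
      | some i => (l.drop (i + 1)).takeWhile (· ≠ c) := by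
  intro l
  induction l with
  | nil => rfl
  | cons a t ih =>
    by_cases h : a = c
    · simp [List.foldl_cons, pvStepA, h, pvFoldTF, List.idxOf?_cons]
    · rw [List.foldl_cons, show pvStepA c c (false, true, []) a = (false, true, []) by
        simp [pvStepA, h]]
      rw [ih, List.idxOf?_cons]
      simp [h]
      cases t.idxOf? c <;> simp

-- takeWhile (· ≠ c) is the prefix before the first occurrence of c
theorem pvTakeWhile_idxOf? (c : Char) : ∀ (l : List Char),
    l.takeWhile (· ≠ c) =
      match l.idxOf? c with
      | none => l
      | some k => l.take k := by
  intro l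
  induction l with
  | nil => rfl
  | cons a t ih =>
    by_cases h : a = c
    · simp [h, List.idxOf?_cons]
    · rw [List.takeWhile_cons_of_pos (by simp [h]), ih, List.idxOf?_cons]
      simp [h]
      cases t.idxOf? c <;> simp

-- the quote helpers agree
theorem pvHelperEq (l : List Char) (c : Char) :
    find_text_between_symbols l c c = pvTryQuote l c := by
  unfold find_text_between_symbols pvTryQuote
  simp only [pvFoldFT]
  cases hi : l.idxOf? c with
  | none => simp
  | some i =>
    simp only [pvTakeWhile_idxOf? c (l.drop (i + 1))]
    cases hk : (l.drop (i + 1)).idxOf? c with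
    | none => simp; split <;> simp_all
    | some k => simp; split <;> simp_all

-- A's fallback loop computes the prefix before the first '(' at index ≥ 1
theorem pvFallbackEq (s : List Char) : ∀ (a : Char) (acc : List Char),
    pvFallbackA (a :: s) acc =
      match s.idxOf? '(' with
      | none => none
      | some k => some (acc ++ (a :: s).take k) := by
  induction s with
  | nil => intro a acc; rfl
  | cons b t ih =>
    intro a acc
    by_cases h : b = '('
    · simp [pvFallbackA, h, List.idxOf?_cons]
    · rw [show pvFallbackA (a :: b :: t) acc = pvFallbackA (b :: t) (acc ++ [a]) by
        simp [pvFallbackA, h]]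
      rw [ih, List.idxOf?_cons]
      simp [h]
      cases t.idxOf? '(' <;> simp

-- pvCapOK is exactly "pvTryQuote returns some"
theorem pvCapOK_iff (l : List Char) (c : Char) :
    pvCapOK l c = true ↔ pvTryQuote l c ≠ none := by
  unfold pvCapOK pvTryQuote
  cases hi : l.idxOf? c with
  | none => simp
  | some i =>
    have hhead : l[i + 1]? = (l.drop (i + 1)).head? := List.head?_drop.symm
    cases hrest : l.drop (i + 1) with
    | nil =>
      rw [hrest] at hhead
      simp [hrest, hhead]
    | cons d r =>
      rw [hrest] at hhead
      simp only [hhead, List.head?_cons]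
      by_cases hd : d = c
      · simp [hrest, hd, List.idxOf?_cons]
      · cases hk : r.idxOf? c <;> simp [hrest, hd, List.idxOf?_cons, hk]

-- dropping the last element of the prefix up to an occurrence of c drops exactly one char
theorem pvTakeDropLast (c : Char) : ∀ (l : List Char) (K : Nat),
    l.idxOf? c = some K → (l.take K).dropLast = l.take (K - 1) := by
  intro l
  induction l with
  | nil => intro K h; simp at h
  | cons a t ih =>
    intro K h
    rw [List.idxOf?_cons] at h
    by_cases ha : a = c
    · simp [ha] at h
      subst h; simp
    · simp [ha] at h
      obtain ⟨k', hk', hK⟩ := h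
      subst hK
      cases k' with
      | zero => simp
      | succ m =>
        have ht : t.take (m + 1) ≠ [] := by
          intro e
          rcases List.take_eq_nil_iff.mp e with h' | h'
          · exact absurd h' (by omega)
          · subst h'; simp at hk'
        simp only [List.take_succ_cons, Nat.add_sub_cancel]
        rw [List.dropLast_cons_of_ne_nil ht]
        have := ih (m + 1) hk'
        simp only [Nat.add_sub_cancel] at this
        rw [this]

-- B's fallback equals A's on a line whose first char is not '(' and which has '(' later
theorem pvFallbackB (a : Char) (t : List Char) (k : Nat)
    (ha : a ≠ '(') (hk : t.idxOf? '(' = some k) :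
    ((a :: t).takeWhile (· ≠ '(')).dropLast = (a :: t).take k := by
  have hidx : (a :: t).idxOf? '(' = some (k + 1) := by
    rw [List.idxOf?_cons]; simp [ha, hk]
  rw [pvTakeWhile_idxOf? '(' (a :: t), hidx]
  have := pvTakeDropLast '(' (a :: t) (k + 1) hidx
  simpa using this

-- ===== VERDICT (by name: the statement is the Claim_ definition above) =====
theorem find_film_name_spec : Claim_equal_find_film_name := by
  intro s _ hpre
  unfold Spec_find_film_name find_film_name find_film_name_alt
  simp only [pvHelperEq]
  cases h1 : pvTryQuote s.toList '\'' with
  | some r => simp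
  | none =>
    cases h2 : pvTryQuote s.toList '"' with
    | some r => simp
    | none =>
      have hc1 : pvCapOK s.toList '\'' = false := by
        have h := pvCapOK_iff s.toList '\''
        rw [h1] at h; simp at h; simp [h]
      have hc2 : pvCapOK s.toList '"' = false := by
        have h := pvCapOK_iff s.toList '"'
        rw [h2] at h; simp at h; simp [h]
      unfold Pre_find_film_name at hpre
      rw [hc1, hc2] at hpre
      simp only [Bool.false_or] at hpre
      cases hl : s.toList with
      | nil => rw [hl] at hpre; simp at hpre
      | cons a t =>
        rw [hl] at hpre
        simp only [List.drop_one, List.tail_cons, List.headD_cons, Bool.and_eq_true] at hpre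
        have hmem : '(' ∈ t := by simpa using hpre.1
        have ha : a ≠ '(' := by simpa using hpre.2
        cases hk : t.idxOf? '(' with
        | none =>
          exact absurd hmem (by simpa using List.idxOf?_eq_none_iff.mp hk)
        | some k =>
          rw [pvFallbackEq t a [], hk]
          simp only [List.nil_append]
          rw [pvFallbackB a t k ha hk]
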